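-- pv_equiv track=rewrite | github.com/brianfarris/EPIJudge | epi_judge_python/pretty_printing.py | minimum_messiness
-- ===== SOURCE A (Python) =====
-- def minimum_messiness(words, line_length):
--     # TODO - you fill in here.
--     num_blanks = line_length - len(words[0])
--     min_mess = [num_blanks **2] + [0] * (len(words) - 1)
--     for i in range(1, len(words)):
--         num_blanks = line_length - len(words[i])
--         # imagine we start new line
--         min_mess[i] = min_mess[i-1] + num_blanks ** 2
--         for j in reversed(range(i)):
--             num_blanks -= len(words[j]) + 1
--             if num_blanks < 0:
--                 break
--             first_j_mess = 0 if j == 0 else min_mess[j-1]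
--             this_mess = num_blanks ** 2
--             min_mess[i] = min(min_mess[i], first_j_mess + this_mess)
--     return min_mess[-1]
-- ===== SOURCE B (Python) =====
-- def minimum_messiness(words, line_length):
--     # Top-down memoized recursion over suffixes: best(i) = minimal messiness of
--     # packing words[i:].  For each start i the feasible line ends are enumerated
--     # first (forward, with their leftover blanks), then best takes the minimum
--     # over all ways to choose the first line.  The warm-up loop fills the memo
--     # from the back so the recursion depth stays O(1) on long inputs.
--     n = len(words)
--
--     def line_ends(i):
--         # (j, blanks) for every j such that words i..j may form one line;
--         # j == i is always allowed, even when the single word overflows.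
--         ends = [(i, line_length - len(words[i]))]
--         blanks = line_length - len(words[i])
--         for j in range(i + 1, n):
--             blanks -= 1 + len(words[j])
--             if blanks < 0:
--                 break
--             ends.append((j, blanks))
--         return ends
--
--     memo = {n: 0}
--
--     def best(i):
--         if i not in memo:
--             memo[i] = min(blanks * blanks + best(j + 1)
--                           for j, blanks in line_ends(i))
--         return memo[i]
--
--     for i in reversed(range(n)):
--         best(i)
--     return best(0)
-- ===== Notes on version B (the rewrite author's own statement) =====
-- stated objective: alternative
-- what changed: Replaces A's bottom-up prefix-indexed DP array with backward inner scans by a top-down memoized recursion over suffixes that first enumerates the feasible line ends forward for each start and takes the minimum over choices of the first line.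
import Mathlib
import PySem

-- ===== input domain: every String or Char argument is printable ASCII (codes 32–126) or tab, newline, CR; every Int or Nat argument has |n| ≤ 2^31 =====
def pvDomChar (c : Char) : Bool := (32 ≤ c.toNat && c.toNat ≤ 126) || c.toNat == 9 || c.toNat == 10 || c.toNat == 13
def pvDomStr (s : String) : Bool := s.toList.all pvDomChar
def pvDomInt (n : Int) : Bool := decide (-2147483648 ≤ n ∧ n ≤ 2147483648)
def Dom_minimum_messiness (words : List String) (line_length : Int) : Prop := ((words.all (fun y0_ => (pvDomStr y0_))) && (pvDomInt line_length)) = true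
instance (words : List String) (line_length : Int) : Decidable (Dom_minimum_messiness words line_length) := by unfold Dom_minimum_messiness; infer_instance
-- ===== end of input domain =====

-- B replaces A's bottom-up prefix DP array (backward inner min-scan per cell) by a top-down
-- memoized recursion over suffixes (feasible line ends enumerated forward per start);
-- objective: alternative decomposition, same asymptotic cost. A raises IndexError on [] (excluded by Pre_); B returns 0 there.

-- ===== PORT A =====
-- inner loop 'for j in reversed(range(i))' of A: carries the running num_blanks and the min accumulator
def mmInnerA (words : List String) (mm : List Int) : Nat → Int → Int → Int
  | j, nb, acc =>
    let nb' := nb - (((words.getD j "").length : Int) + 1)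
    if nb' < 0 then acc
    else
      match j with
      | 0 => min acc (0 + nb' * nb')                       -- first_j_mess = 0 when j == 0; loop ends after j = 0
      | j' + 1 => mmInnerA words mm j' nb' (min acc (mm.getD j' 0 + nb' * nb'))

def minimum_messiness (words : List String) (line_length : Int) : Int :=
  match words with
  | [] => 0                                                 -- Python raises IndexError on words[0] here (outside Pre_)
  | w0 :: _ =>
    let n := words.length
    let nb0 := line_length - (w0.length : Int)
    let mm0 : List Int := nb0 * nb0 :: List.replicate (n - 1) 0
    let mmf := (List.range' 1 (n - 1)).foldl (fun mm i =>
      let nb := line_length - ((words.getD i "").length : Int)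
      -- min_mess[i] = min_mess[i-1] + num_blanks**2, then lowered by the inner loop; we set it once at the end
      mm.set i (mmInnerA words mm (i - 1) nb (mm.getD (i - 1) 0 + nb * nb))) mm0
    mmf.getD (n - 1) 0                                      -- min_mess[-1] on the nonempty list

-- ===== PORT B =====
-- loop 'for j in range(i + 1, n)' of line_ends, with its break; fuel = n - (i + 1) iterations
def leAux (words : List String) : Nat → Nat → Int → List (Nat × Int)
  | 0, _, _ => []
  | fuel + 1, j, blanks =>
    let b' := blanks - (1 + ((words.getD j "").length : Int))
    if b' < 0 then []
    else (j, b') :: leAux words fuel (j + 1) b'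

-- line_ends(i): (j, blanks) for every j such that words i..j may form one line
def lineEnds (words : List String) (line_length : Int) (i : Nat) : List (Nat × Int) :=
  let b0 := line_length - ((words.getD i "").length : Int)
  (i, b0) :: leAux words (words.length - (i + 1)) (i + 1) b0

-- best(i) with the memo dict threaded through; fuel only bounds the recursion depth
def bestL (words : List String) (line_length : Int) : Nat → Nat → PySem.Dict Nat Int → Int × PySem.Dict Nat Int
  | fuel, i, memo =>
    match memo.get? i with
    | some v => (v, memo)                                   -- 'if i not in memo' is False: return memo[i]
    | none =>
      match fuel with
      | 0 => (0, memo)                                      -- fuel guard only; unreachable when fuel ≥ n - i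
      | fuel' + 1 =>
        -- min(blanks * blanks + best(j + 1) for j, blanks in line_ends(i)), threading the memo
        let st := (lineEnds words line_length i).foldl
          (fun (p : Option Int × PySem.Dict Nat Int) (jb : Nat × Int) =>
            let r := bestL words line_length fuel' (jb.1 + 1) p.2
            let c := jb.2 * jb.2 + r.1
            (match p.1 with
             | none => some c
             | some a => some (min a c), r.2)) (none, memo)
        let v := st.1.getD 0                                -- line_ends(i) is nonempty, so the min exists; getD is a type guard
        (v, st.2.insert i v)

def minimum_messiness_alt (words : List String) (line_length : Int) : Int :=
  -- warm-up loop 'for i in reversed(range(n)): best(i)' keeps the Python recursion shallow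
  let memo1 := ((List.range words.length).reverse).foldl
    (fun memo i => (bestL words line_length words.length i memo).2)
    ((PySem.Dict.empty).insert words.length 0)
  (bestL words line_length words.length 0 memo1).1

-- ===== PRECONDITION & SPEC =====
-- Pre_ excludes only the empty word list, on which the Python A raises IndexError.
def Pre_minimum_messiness (words : List String) (line_length : Int) : Prop := words ≠ []
instance (words : List String) (line_length : Int) : Decidable (Pre_minimum_messiness words line_length) := by unfold Pre_minimum_messiness; infer_instance
def pvWitness_minimum_messiness : List String × Int := (["ab", "c", "d"], 4)

def Spec_minimum_messiness (words : List String) (line_length : Int) (out : Int) : Prop := out = minimum_messiness_alt words line_length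
instance (words : List String) (line_length : Int) (out : Int) : Decidable (Spec_minimum_messiness words line_length out) := by unfold Spec_minimum_messiness; infer_instance

-- ===== CLAIM (what is proved, stated in full; the proofs are below) =====
def Claim_equal_minimum_messiness : Prop := ∀ (words : List String) (line_length : Int), Dom_minimum_messiness words line_length → Pre_minimum_messiness words line_length → Spec_minimum_messiness words line_length (minimum_messiness words line_length)

-- ===== LEMMAS AND PROOFS =====

-- length (as Int) of the t-th word
def wlen (ws : List String) (t : Nat) : Int := ((ws.getD t "").length : Int)

-- characters used by the line holding words i..k (word lengths plus single blanks); -1 when k + 1 = i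
def usedL (ws : List String) (i k : Nat) : Int := ((List.range' i (k + 1 - i)).map (wlen ws)).sum + ((k : Int) - (i : Int))

-- blanks left on the line holding words i..k
def blk (ws : List String) (ll : Int) (i k : Nat) : Int := ll - usedL ws i k

-- reference prefix DP: Flist ws ll k = [F 0, …, F k] where F c = minimal messiness of the first c words
def Flist (ws : List String) (ll : Int) : Nat → List Int
  | 0 => [0]
  | k + 1 =>
    let fl := Flist ws ll k
    fl ++ [(List.range k).foldl
      (fun acc i' => if 0 ≤ blk ws ll i' k then min acc (fl.getD i' 0 + blk ws ll i' k * blk ws ll i' k) else acc)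
      (fl.getD k 0 + blk ws ll k k * blk ws ll k k)]

def Fv (ws : List String) (ll : Int) (k : Nat) : Int := (Flist ws ll k).getD k 0

-- min of a list, none when empty
def omin (l : List Int) : Option Int :=
  l.foldl (fun o x => match o with | none => some x | some a => some (min a x)) none

-- reference suffix value (fuel form): GvF fuel i = minimal messiness of words i.. when fuel ≥ n - i
def GvF (ws : List String) (ll : Int) : Nat → Nat → Int
  | 0, _ => 0
  | fuel + 1, i =>
    if ws.length ≤ i then 0
    else (omin ((lineEnds ws ll i).map
      (fun jb => jb.2 * jb.2 + GvF ws ll fuel (jb.1 + 1)))).getD 0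

def Gv (ws : List String) (ll : Int) (i : Nat) : Int := GvF ws ll (ws.length - i) i

-- a chain of line segments (start, end-inclusive) covering words a..b-1, each feasible
def SegChain (ws : List String) (ll : Int) : Nat → Nat → List (Nat × Nat) → Prop
  | a, b, [] => a = b
  | a, b, se :: rest => se.1 = a ∧ a ≤ se.2 ∧ se.2 + 1 ≤ b ∧ (se.2 = a ∨ 0 ≤ blk ws ll a se.2) ∧ SegChain ws ll (se.2 + 1) b rest

def chainCost (ws : List String) (ll : Int) (segs : List (Nat × Nat)) : Int :=
  (segs.map (fun se => blk ws ll se.1 se.2 * blk ws ll se.1 se.2)).sum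

theorem wlen_nonneg (ws : List String) (t : Nat) : 0 ≤ wlen ws t := by
  simp [wlen]

theorem usedL_self (ws : List String) (i : Nat) : usedL ws i i = wlen ws i := by
  simp [usedL]

theorem usedL_succ (ws : List String) (i k : Nat) (h : i ≤ k + 1) :
    usedL ws i (k + 1) = usedL ws i k + wlen ws (k + 1) + 1 := by
  unfold usedL
  have h2 : k + 1 + 1 - i = (k + 1 - i) + 1 := by omega
  have h3 : i + (k + 1 - i) = k + 1 := by omega
  rw [h2, List.range'_1_concat, h3]
  simp only [List.map_append, List.map_cons, List.map_nil, List.sum_append, List.sum_cons,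
    List.sum_nil]
  push_cast
  ring

theorem usedL_lo (ws : List String) (j k : Nat) (h : j ≤ k) :
    usedL ws j k = usedL ws (j + 1) k + wlen ws j + 1 := by
  unfold usedL
  have h2 : k + 1 - j = (k + 1 - (j + 1)) + 1 := by omega
  rw [h2, List.range'_succ]
  simp only [List.map_cons, List.sum_cons]
  push_cast
  ring

theorem usedL_mono_fst (ws : List String) (i' j k : Nat) (h1 : i' ≤ j) (h2 : j ≤ k) :
    usedL ws j k ≤ usedL ws i' k := by
  induction j with
  | zero =>
    have : i' = 0 := by omega
    simp [this]
  | succ j ih =>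
    rcases Nat.eq_or_lt_of_le h1 with he | hlt
    · simp [he]
    · have h1' : i' ≤ j := by omega
      have hjk : j ≤ k := by omega
      calc usedL ws (j + 1) k ≤ usedL ws (j + 1) k + wlen ws j + 1 := by
              have := wlen_nonneg ws j; omega
        _ = usedL ws j k := (usedL_lo ws j k hjk).symm
        _ ≤ usedL ws i' k := ih h1' hjk

theorem usedL_mono_snd (ws : List String) (i j k : Nat) (h1 : i ≤ j) (h2 : j ≤ k) :
    usedL ws i j ≤ usedL ws i k := by
  induction k with
  | zero =>
    have : j = 0 := by omega
    simp [this]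
  | succ k ih =>
    rcases Nat.eq_or_lt_of_le h2 with he | hlt
    · simp [he]
    · have h2' : j ≤ k := by omega
      have hik : i ≤ k + 1 := by omega
      calc usedL ws i j ≤ usedL ws i k := ih h2'
        _ ≤ usedL ws i k + wlen ws (k + 1) + 1 := by
              have := wlen_nonneg ws (k + 1); omega
        _ = usedL ws i (k + 1) := (usedL_succ ws i k hik).symm

theorem Flist_length (ws : List String) (ll : Int) (k : Nat) : (Flist ws ll k).length = k + 1 := by
  induction k with
  | zero => simp [Flist]
  | succ k ih => simp [Flist, ih]

theorem Flist_getD (ws : List String) (ll : Int) (m k : Nat) (h : k ≤ m) :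
    (Flist ws ll m).getD k 0 = Fv ws ll k := by
  induction m with
  | zero =>
    have : k = 0 := by omega
    simp [this, Fv]
  | succ m ih =>
    rcases Nat.eq_or_lt_of_le h with he | hlt
    · simp [he, Fv]
    · have hk : k ≤ m := by omega
      have hlen : k < (Flist ws ll m).length := by rw [Flist_length]; omega
      rw [show Flist ws ll (m + 1) = Flist ws ll m ++ [(List.range m).foldl
        (fun acc i' => if 0 ≤ blk ws ll i' m then min acc ((Flist ws ll m).getD i' 0 + blk ws ll i' m * blk ws ll i' m) else acc)
        ((Flist ws ll m).getD m 0 + blk ws ll m m * blk ws ll m m)] from rfl]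
      rw [List.getD_append _ _ _ _ hlen]
      exact ih hk

theorem foldl_min_shift (l : List Int) (a x : Int) :
    l.foldl min (min a x) = min (l.foldl min a) x := by
  induction l generalizing a with
  | nil => rfl
  | cons y t ih =>
    simp only [List.foldl_cons]
    rw [show min (min a x) y = min (min a y) x by
      rw [min_assoc, min_comm x y, ← min_assoc], ih]

theorem foldl_min_reverse (l : List Int) (a : Int) :
    l.reverse.foldl min a = l.foldl min a := by
  induction l generalizing a with
  | nil => rfl
  | cons x t ih =>
    simp only [List.reverse_cons, List.foldl_append, List.foldl_cons, List.foldl_nil]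
    rw [ih, ← foldl_min_shift]

theorem foldl_ite_filterMap (l : List Nat) (p : Nat → Prop) [DecidablePred p] (g : Nat → Int) (a : Int) :
    l.foldl (fun acc x => if p x then min acc (g x) else acc) a
      = (l.filterMap (fun x => if p x then some (g x) else none)).foldl min a := by
  induction l generalizing a with
  | nil => rfl
  | cons x t ih =>
    by_cases h : p x <;> simp [h, ih]

theorem omin_some (l : List Int) (a : Int) :
    l.foldl (fun o x => match o with | none => some x | some a => some (min a x)) (some a)
      = some (l.foldl min a) := by
  induction l generalizing a with
  | nil => rfl
  | cons x t ih => simp [ih]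

theorem omin_cons (x : Int) (t : List Int) : omin (x :: t) = some (t.foldl min x) := by
  unfold omin
  simp only [List.foldl_cons]
  exact omin_some t x

-- fold min is a lower bound of the base and of every member
theorem foldl_min_le_base (l : List Int) (a : Int) : l.foldl min a ≤ a := by
  induction l generalizing a with
  | nil => exact le_refl a
  | cons x t ih => exact le_trans (ih (min a x)) (min_le_left a x)

theorem foldl_min_le_mem (l : List Int) : ∀ a x, x ∈ l → l.foldl min a ≤ x := by
  induction l with
  | nil => intro a x h; cases h
  | cons y t ih =>
    intro a x h
    rcases List.mem_cons.mp h with he | hm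
    · subst he
      exact le_trans (foldl_min_le_base t (min a x)) (min_le_right a x)
    · exact ih (min a y) x hm

-- fold min is the base or a member
theorem foldl_min_mem_or (l : List Int) (a : Int) : l.foldl min a = a ∨ l.foldl min a ∈ l := by
  induction l generalizing a with
  | nil => exact Or.inl rfl
  | cons x t ih =>
    rcases ih (min a x) with he | hm
    · rcases min_choice a x with h1 | h1
      · rw [List.foldl_cons, he, h1]; exact Or.inl rfl
      · rw [List.foldl_cons, he, h1]; exact Or.inr (List.mem_cons_self)
    · exact Or.inr (List.mem_cons_of_mem x hm)

-- F (k+1) as a fold of min over the candidate list of cell k+1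
theorem Fv_succ_fold (ws : List String) (ll : Int) (k : Nat) :
    Fv ws ll (k + 1) = ((List.range k).filterMap
        (fun i' => if 0 ≤ blk ws ll i' k then some (Fv ws ll i' + blk ws ll i' k * blk ws ll i' k) else none)).foldl
      min (Fv ws ll k + blk ws ll k k * blk ws ll k k) := by
  have hx : Fv ws ll (k + 1) = (List.range k).foldl
      (fun acc i' => if 0 ≤ blk ws ll i' k then min acc ((Flist ws ll k).getD i' 0 + blk ws ll i' k * blk ws ll i' k) else acc)
      ((Flist ws ll k).getD k 0 + blk ws ll k k * blk ws ll k k) := by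
    show (Flist ws ll (k + 1)).getD (k + 1) 0 = _
    rw [show Flist ws ll (k + 1) = Flist ws ll k ++ [(List.range k).foldl
      (fun acc i' => if 0 ≤ blk ws ll i' k then min acc ((Flist ws ll k).getD i' 0 + blk ws ll i' k * blk ws ll i' k) else acc)
      ((Flist ws ll k).getD k 0 + blk ws ll k k * blk ws ll k k)] from rfl]
    rw [List.getD_append_right _ _ _ _ (by rw [Flist_length])]
    simp [Flist_length]
  rw [hx, Flist_getD ws ll k k le_rfl]
  have step1 : (List.range k).foldl
      (fun acc i' => if 0 ≤ blk ws ll i' k then min acc ((Flist ws ll k).getD i' 0 + blk ws ll i' k * blk ws ll i' k) else acc)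
      (Fv ws ll k + blk ws ll k k * blk ws ll k k)
      = (List.range k).foldl
      (fun acc i' => if 0 ≤ blk ws ll i' k then min acc (Fv ws ll i' + blk ws ll i' k * blk ws ll i' k) else acc)
      (Fv ws ll k + blk ws ll k k * blk ws ll k k) := by
    apply PySem.List.foldl_congr_mem
    intro acc x hxm
    rw [Flist_getD ws ll k x (Nat.le_of_lt (List.mem_range.mp hxm))]
  rw [step1]
  exact foldl_ite_filterMap _ _ _ _

-- A's inner loop computes the fold of min over the (reversed) candidate list
theorem mmInnerA_spec (ws : List String) (ll : Int) (mm : List Int) (i : Nat)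
    (hmm : ∀ t, t < i → mm.getD t 0 = Fv ws ll (t + 1)) :
    ∀ j, j < i → ∀ nb acc, nb = ll - usedL ws (j + 1) i →
      mmInnerA ws mm j nb acc
        = (((List.range (j + 1)).filterMap (fun i' => if 0 ≤ blk ws ll i' i then some (Fv ws ll i' + blk ws ll i' i * blk ws ll i' i) else none)).reverse).foldl min acc := by
  intro j
  induction j with
  | zero =>
    intro hji nb acc hnb
    have hb : nb - (((ws.getD 0 "").length : Int) + 1) = blk ws ll 0 i := by
      simp only [blk]
      rw [usedL_lo ws 0 i (Nat.zero_le i)]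
      simp only [wlen] at *
      omega
    simp only [mmInnerA, hb]
    by_cases hneg : blk ws ll 0 i < 0
    · rw [if_pos hneg]
      have : (if 0 ≤ blk ws ll 0 i then some (Fv ws ll 0 + blk ws ll 0 i * blk ws ll 0 i) else none) = none := by
        rw [if_neg (show ¬ (0:Int) ≤ blk ws ll 0 i by omega)]
      simp [List.range_succ, this]
    · rw [if_neg hneg]
      have hsing : List.filterMap (fun i' => if 0 ≤ blk ws ll i' i then some (Fv ws ll i' + blk ws ll i' i * blk ws ll i' i) else none) (List.range (0 + 1))
          = [Fv ws ll 0 + blk ws ll 0 i * blk ws ll 0 i] := by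
        rw [show List.range (0 + 1) = [0] from List.range_one]
        simp only [List.filterMap_cons, List.filterMap_nil, if_pos (by omega : (0:Int) ≤ blk ws ll 0 i)]
      rw [hsing]
      have hF0 : Fv ws ll 0 = 0 := rfl
      rw [hF0]
      simp
  | succ j' ih =>
    intro hji nb acc hnb
    have hb : nb - (((ws.getD (j' + 1) "").length : Int) + 1) = blk ws ll (j' + 1) i := by
      simp only [blk]
      rw [usedL_lo ws (j' + 1) i (by omega)]
      simp only [wlen] at *
      omega
    simp only [mmInnerA, hb]
    by_cases hneg : blk ws ll (j' + 1) i < 0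
    · rw [if_pos hneg]
      have hall : ∀ i' ∈ List.range (j' + 1 + 1),
          (if 0 ≤ blk ws ll i' i then some (Fv ws ll i' + blk ws ll i' i * blk ws ll i' i) else none) = none := by
        intro i' hi'
        have hi2 : i' < j' + 1 + 1 := List.mem_range.mp hi'
        have h1 : usedL ws (j' + 1) i ≤ usedL ws i' i :=
          usedL_mono_fst ws i' (j' + 1) i (by omega) (by omega)
        have h2 : blk ws ll i' i ≤ blk ws ll (j' + 1) i := by
          simp only [blk]; omega
        rw [if_neg (show ¬ (0:Int) ≤ blk ws ll i' i by omega)]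
      rw [List.filterMap_eq_nil_iff.mpr hall]
      rfl
    · rw [if_neg hneg]
      rw [ih (by omega) (blk ws ll (j' + 1) i) _ (by simp only [blk])]
      have hc : (List.filterMap (fun i' => if 0 ≤ blk ws ll i' i then some (Fv ws ll i' + blk ws ll i' i * blk ws ll i' i) else none) [j' + 1])
          = [Fv ws ll (j' + 1) + blk ws ll (j' + 1) i * blk ws ll (j' + 1) i] := by
        simp [if_pos (by omega : (0:Int) ≤ blk ws ll (j' + 1) i)]
      rw [show List.range (j' + 1 + 1) = List.range (j' + 1) ++ [j' + 1] from List.range_succ,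
        List.filterMap_append, hc, List.reverse_append]
      have hr : mm.getD j' 0 = Fv ws ll (j' + 1) := hmm j' (by omega)
      rw [hr]
      simp

-- A's outer loop, named for the proofs
def stepA (ws : List String) (ll : Int) (mm : List Int) (i : Nat) : List Int :=
  let nb := ll - ((ws.getD i "").length : Int)
  mm.set i (mmInnerA ws mm (i - 1) nb (mm.getD (i - 1) 0 + nb * nb))

def initA (ws : List String) (ll : Int) : List Int :=
  (ll - wlen ws 0) * (ll - wlen ws 0) :: List.replicate (ws.length - 1) 0

-- A's outer loop maintains min_mess[t] = F (t+1) for processed t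
theorem outerA_spec (ws : List String) (ll : Int) :
    ∀ m, m + 1 ≤ ws.length →
      ((List.range' 1 m).foldl (stepA ws ll) (initA ws ll)).length = ws.length
      ∧ ∀ t, t ≤ m →
        ((List.range' 1 m).foldl (stepA ws ll) (initA ws ll)).getD t 0 = Fv ws ll (t + 1) := by
  intro m
  induction m with
  | zero =>
    intro h
    constructor
    · simp [initA]; omega
    · intro t ht
      have ht0 : t = 0 := by omega
      subst ht0
      have hF1 : Fv ws ll 1 = (ll - wlen ws 0) * (ll - wlen ws 0) := by
        rw [Fv_succ_fold ws ll 0]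
        simp only [List.range_zero, List.filterMap_nil, List.foldl_nil]
        rw [show Fv ws ll 0 = 0 from rfl]
        simp only [blk, usedL_self]
        ring
      simp [initA, hF1]
  | succ m ih =>
    intro h
    obtain ⟨ihlen, ihval⟩ := ih (by omega)
    rw [show List.range' 1 (m + 1) = List.range' 1 m ++ [1 + m] from List.range'_1_concat,
      List.foldl_append, List.foldl_cons, List.foldl_nil, show 1 + m = m + 1 from Nat.add_comm 1 m]
    set prev := (List.range' 1 m).foldl (stepA ws ll) (initA ws ll) with hprev
    have hnb : ll - ((ws.getD (m + 1) "").length : Int) = blk ws ll (m + 1) (m + 1) := by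
      simp only [blk, usedL_self, wlen]
    have hstep : stepA ws ll prev (m + 1)
        = prev.set (m + 1) (mmInnerA ws prev m (blk ws ll (m + 1) (m + 1))
            (prev.getD m 0 + blk ws ll (m + 1) (m + 1) * blk ws ll (m + 1) (m + 1))) := by
      simp only [stepA, hnb, Nat.add_sub_cancel]
    rw [hstep]
    have hinner : mmInnerA ws prev m (blk ws ll (m + 1) (m + 1))
        (prev.getD m 0 + blk ws ll (m + 1) (m + 1) * blk ws ll (m + 1) (m + 1)) = Fv ws ll (m + 2) := by
      rw [mmInnerA_spec ws ll prev (m + 1) (fun t ht => ihval t (by omega)) m (by omega) _ _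
        (by simp only [blk])]
      rw [foldl_min_reverse, ihval m le_rfl, Fv_succ_fold ws ll (m + 1)]
    rw [hinner]
    constructor
    · simp [ihlen]
    · intro t ht
      by_cases hte : t = m + 1
      · subst hte
        simp [List.getD_eq_getElem?_getD, ihlen, show m + 1 < ws.length by omega]
      · have : t ≤ m := by omega
        rw [List.getD_eq_getElem?_getD, List.getElem?_set_ne (by omega), ← List.getD_eq_getElem?_getD]
        exact ihval t this

theorem A_eq_Fv (ws : List String) (ll : Int) (h : ws ≠ []) :
    minimum_messiness ws ll = Fv ws ll ws.length := by
  cases ws with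
  | nil => exact absurd rfl h
  | cons w0 rest =>
    have h1 : minimum_messiness (w0 :: rest) ll
        = ((List.range' 1 ((w0 :: rest).length - 1)).foldl (stepA (w0 :: rest) ll)
            (initA (w0 :: rest) ll)).getD ((w0 :: rest).length - 1) 0 := by
      simp only [minimum_messiness, initA, wlen]
      rfl
    rw [h1]
    have h2 := (outerA_spec (w0 :: rest) ll ((w0 :: rest).length - 1) (by simp)).2
      ((w0 :: rest).length - 1) le_rfl
    rw [h2]
    congr 1

-- ===== B-side lemmas =====

-- every element of leAux: bounds, exact blanks value, nonnegativity
theorem leAux_mem (ws : List String) (ll : Int) (i : Nat) :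
    ∀ fuel j blanks, i + 1 ≤ j → blanks = blk ws ll i (j - 1) →
      ∀ jb, jb ∈ leAux ws fuel j blanks →
        j ≤ jb.1 ∧ jb.1 < j + fuel ∧ jb.2 = blk ws ll i jb.1 ∧ 0 ≤ jb.2 := by
  intro fuel
  induction fuel with
  | zero => intro j blanks _ _ jb hm; cases hm
  | succ fuel ih =>
    intro j blanks hij hbl jb hm
    have hb' : blanks - (1 + ((ws.getD j "").length : Int)) = blk ws ll i j := by
      have hs := usedL_succ ws i (j - 1) (by omega)
      rw [show j - 1 + 1 = j from by omega] at hs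
      simp only [blk, wlen] at *
      omega
    simp only [leAux, hb'] at hm
    by_cases hneg : blk ws ll i j < 0
    · rw [if_pos hneg] at hm; cases hm
    · rw [if_neg hneg] at hm
      rcases List.mem_cons.mp hm with he | hm'
      · subst he
        exact ⟨le_rfl, by omega, rfl, by omega⟩
      · have := ih (j + 1) (blk ws ll i j) (by omega) (by rw [Nat.add_sub_cancel]) jb hm'
        exact ⟨by omega, by omega, this.2.2.1, this.2.2.2⟩

theorem lineEnds_mem (ws : List String) (ll : Int) (i : Nat) (jb : Nat × Int)
    (hm : jb ∈ lineEnds ws ll i) :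
    i ≤ jb.1 ∧ jb.1 < max ws.length (i + 1) ∧ jb.2 = blk ws ll i jb.1
      ∧ (jb.1 = i ∨ 0 ≤ jb.2) := by
  have hb0 : ll - ((ws.getD i "").length : Int) = blk ws ll i i := by
    simp only [blk, usedL_self, wlen]
  simp only [lineEnds, hb0] at hm
  rcases List.mem_cons.mp hm with he | hm'
  · subst he
    exact ⟨le_rfl, by omega, rfl, Or.inl rfl⟩
  · have := leAux_mem ws ll i (ws.length - (i + 1)) (i + 1) (blk ws ll i i) le_rfl
      (by rw [Nat.add_sub_cancel]) jb hm'
    exact ⟨by omega, by omega, this.2.2.1, Or.inr this.2.2.2⟩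

-- completeness: every feasible end appears in leAux
theorem leAux_complete (ws : List String) (ll : Int) (i e : Nat) (hfe : 0 ≤ blk ws ll i e) :
    ∀ fuel j blanks, i + 1 ≤ j → j ≤ e → e < j + fuel → blanks = blk ws ll i (j - 1) →
      (e, blk ws ll i e) ∈ leAux ws fuel j blanks := by
  intro fuel
  induction fuel with
  | zero => intro j blanks _ hje hef _; omega
  | succ fuel ih =>
    intro j blanks hij hje hef hbl
    have hb' : blanks - (1 + ((ws.getD j "").length : Int)) = blk ws ll i j := by
      have hs := usedL_succ ws i (j - 1) (by omega)
      rw [show j - 1 + 1 = j from by omega] at hs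
      simp only [blk, wlen] at *
      omega
    have hmono : usedL ws i j ≤ usedL ws i e := usedL_mono_snd ws i j e (by omega) hje
    have hnneg : ¬ blk ws ll i j < 0 := by
      simp only [blk] at *; omega
    simp only [leAux, hb']
    rw [if_neg hnneg]
    rcases Nat.eq_or_lt_of_le hje with he | hlt
    · subst he
      exact List.mem_cons_self
    · exact List.mem_cons_of_mem _ (ih (j + 1) (blk ws ll i j) (by omega) (by omega) (by omega)
        (by rw [Nat.add_sub_cancel]))

theorem lineEnds_complete (ws : List String) (ll : Int) (i e : Nat) (hie : i ≤ e)
    (hen : e < ws.length) (hfe : e = i ∨ 0 ≤ blk ws ll i e) :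
    (e, blk ws ll i e) ∈ lineEnds ws ll i := by
  have hb0 : ll - ((ws.getD i "").length : Int) = blk ws ll i i := by
    simp only [blk, usedL_self, wlen]
  simp only [lineEnds, hb0]
  rcases Nat.eq_or_lt_of_le hie with he0 | hlt
  · subst he0
    exact List.mem_cons_self
  · rcases hfe with he | hge
    · omega
    · exact List.mem_cons_of_mem _ (leAux_complete ws ll i e hge (ws.length - (i + 1)) (i + 1)
        (blk ws ll i i) le_rfl (by omega) (by omega) (by rw [Nat.add_sub_cancel]))

-- GvF does not depend on the fuel once it covers n - i
theorem GvF_eq_Gv (ws : List String) (ll : Int) :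
    ∀ fuel i, ws.length - i ≤ fuel → GvF ws ll fuel i = Gv ws ll i := by
  intro fuel
  induction fuel using Nat.strong_induction_on with
  | _ fuel ih =>
    intro i h
    match fuel with
    | 0 =>
      have hni : ws.length ≤ i := by omega
      unfold Gv
      rw [show ws.length - i = 0 from by omega]
    | fuel + 1 =>
      by_cases hni : ws.length ≤ i
      · unfold Gv
        rw [show ws.length - i = 0 from by omega]
        simp [GvF, hni]
      · have hlt : i < ws.length := by omega
        obtain ⟨d, hd⟩ : ∃ d, ws.length - i = d + 1 := ⟨ws.length - i - 1, by omega⟩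
        have hmap : ∀ fu, fu < fuel + 1 → ws.length - (i + 1) ≤ fu →
            (lineEnds ws ll i).map (fun jb => jb.2 * jb.2 + GvF ws ll fu (jb.1 + 1))
              = (lineEnds ws ll i).map (fun jb => jb.2 * jb.2 + Gv ws ll (jb.1 + 1)) := by
          intro fu hfu1 hfu2
          apply List.map_congr_left
          intro jb hjb
          have hb := lineEnds_mem ws ll i jb hjb
          rw [ih fu hfu1 (jb.1 + 1) (by omega)]
        have hL : GvF ws ll (fuel + 1) i
            = (omin ((lineEnds ws ll i).map (fun jb => jb.2 * jb.2 + Gv ws ll (jb.1 + 1)))).getD 0 := by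
          rw [show GvF ws ll (fuel + 1) i = (omin ((lineEnds ws ll i).map
            (fun jb => jb.2 * jb.2 + GvF ws ll fuel (jb.1 + 1)))).getD 0 from by
              simp [GvF, hni]]
          rw [hmap fuel (by omega) (by omega)]
        have e1 : Gv ws ll i = GvF ws ll (d + 1) i := by
          unfold Gv
          rw [hd]
        have hR : Gv ws ll i
            = (omin ((lineEnds ws ll i).map (fun jb => jb.2 * jb.2 + Gv ws ll (jb.1 + 1)))).getD 0 := by
          rw [e1, show GvF ws ll (d + 1) i = (omin ((lineEnds ws ll i).map
            (fun jb => jb.2 * jb.2 + GvF ws ll d (jb.1 + 1)))).getD 0 from by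
              simp [GvF, hni]]
          rw [hmap d (by omega) (by omega)]
        rw [hL, hR]

theorem Gv_stop (ws : List String) (ll : Int) (i : Nat) (h : ws.length ≤ i) : Gv ws ll i = 0 := by
  unfold Gv
  rw [show ws.length - i = 0 from by omega]
  rfl

-- Gv i as the min over line-end candidates (i < n)
theorem Gv_fold (ws : List String) (ll : Int) (i : Nat) (h : i < ws.length) :
    Gv ws ll i = (omin ((lineEnds ws ll i).map (fun jb => jb.2 * jb.2 + Gv ws ll (jb.1 + 1)))).getD 0 := by
  obtain ⟨d, hd⟩ : ∃ d, ws.length - i = d + 1 := ⟨ws.length - i - 1, by omega⟩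
  have h1 : Gv ws ll i = GvF ws ll (d + 1) i := by unfold Gv; rw [hd]
  rw [h1, show GvF ws ll (d + 1) i = (omin ((lineEnds ws ll i).map
      (fun jb => jb.2 * jb.2 + GvF ws ll d (jb.1 + 1)))).getD 0 from by
        simp [GvF, show ¬ ws.length ≤ i by omega]]
  congr 2
  apply List.map_congr_left
  intro jb hjb
  have hb := lineEnds_mem ws ll i jb hjb
  rw [GvF_eq_Gv ws ll d (jb.1 + 1) (by omega)]

-- Gv is a lower bound of every candidate
theorem Gv_le (ws : List String) (ll : Int) (i : Nat) (h : i < ws.length)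
    (jb : Nat × Int) (hm : jb ∈ lineEnds ws ll i) :
    Gv ws ll i ≤ jb.2 * jb.2 + Gv ws ll (jb.1 + 1) := by
  rw [Gv_fold ws ll i h]
  obtain ⟨a, b, hle⟩ : ∃ a b, lineEnds ws ll i = a :: b := by
    cases hle : lineEnds ws ll i with
    | nil => rw [hle] at hm; cases hm
    | cons a b => exact ⟨a, b, rfl⟩
  rw [hle] at hm ⊢
  rw [List.map_cons, omin_cons, Option.getD_some]
  rcases List.mem_cons.mp hm with he | hmt
  · subst he
    exact foldl_min_le_base _ _
  · exact foldl_min_le_mem _ _ _ (List.mem_map_of_mem hmt)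

-- Gv attains one of its candidates
theorem Gv_attained (ws : List String) (ll : Int) (i : Nat) (h : i < ws.length) :
    ∃ jb ∈ lineEnds ws ll i, Gv ws ll i = jb.2 * jb.2 + Gv ws ll (jb.1 + 1) := by
  rw [Gv_fold ws ll i h]
  cases hle : lineEnds ws ll i with
  | nil => simp [lineEnds] at hle
  | cons a t =>
    rw [List.map_cons, omin_cons, Option.getD_some]
    have := foldl_min_mem_or (t.map (fun jb => jb.2 * jb.2 + Gv ws ll (jb.1 + 1)))
      (a.2 * a.2 + Gv ws ll (a.1 + 1))
    rcases this with he | hm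
    · exact ⟨a, List.mem_cons_self, he⟩
    · obtain ⟨jb, hjb, hv⟩ := List.mem_map.mp hm
      exact ⟨jb, List.mem_cons_of_mem a hjb, hv.symm⟩

-- a chain only covers forward
theorem chain_le (ws : List String) (ll : Int) :
    ∀ segs a b, SegChain ws ll a b segs → a ≤ b := by
  intro segs
  induction segs with
  | nil => intro a b h; exact Nat.le_of_eq h
  | cons se rest ih =>
    intro a b h
    obtain ⟨h1, h2, h3, h4, h5⟩ := h
    have := ih (se.2 + 1) b h5
    omega

-- chains: splitting off / appending the last segment
theorem chain_snoc (ws : List String) (ll : Int) :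
    ∀ segs a b s e, SegChain ws ll a b (segs ++ [(s, e)]) →
      SegChain ws ll a s segs ∧ s ≤ e ∧ e + 1 = b ∧ (e = s ∨ 0 ≤ blk ws ll s e) := by
  intro segs
  induction segs with
  | nil =>
    intro a b s e h
    obtain ⟨h1, h2, h3, h4, h5⟩ := h
    have hb : e + 1 = b := h5
    subst h1
    exact ⟨rfl, h2, hb, h4⟩
  | cons se rest ih =>
    intro a b s e h
    obtain ⟨h1, h2, h3, h4, h5⟩ := h
    obtain ⟨k1, k2, k3, k4⟩ := ih (se.2 + 1) b s e h5
    exact ⟨⟨h1, h2, chain_le ws ll rest (se.2 + 1) s k1, h4, k1⟩, k2, k3, k4⟩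

theorem chain_snoc' (ws : List String) (ll : Int) :
    ∀ segs a s e, SegChain ws ll a s segs → s ≤ e → (e = s ∨ 0 ≤ blk ws ll s e) →
      SegChain ws ll a (e + 1) (segs ++ [(s, e)]) := by
  intro segs
  induction segs with
  | nil =>
    intro a s e h hse hf
    subst h
    exact ⟨rfl, hse, le_rfl, hf, rfl⟩
  | cons se rest ih =>
    intro a s e h hse hf
    obtain ⟨h1, h2, h3, h4, h5⟩ := h
    refine ⟨h1, h2, ?_, h4, ih (se.2 + 1) s e h5 hse hf⟩
    have := chain_le ws ll rest (se.2 + 1) s h5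
    omega

theorem chainCost_snoc (ws : List String) (ll : Int) (segs : List (Nat × Nat)) (s e : Nat) :
    chainCost ws ll (segs ++ [(s, e)]) = chainCost ws ll segs + blk ws ll s e * blk ws ll s e := by
  simp [chainCost]

-- L1: Fv is a lower bound for the cost of every chain of [0, k)
theorem Fv_le_chain (ws : List String) (ll : Int) :
    ∀ segs k, SegChain ws ll 0 k segs → Fv ws ll k ≤ chainCost ws ll segs := by
  intro segs
  induction segs using List.reverseRecOn with
  | nil =>
    intro k h
    have : (0 : Nat) = k := h
    subst this
    simp [chainCost, Fv, Flist]
  | append_singleton segs se ih =>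
    intro k h
    obtain ⟨h1, h2, h3, h4⟩ := chain_snoc ws ll segs 0 k se.1 se.2 (by
      rw [show segs ++ [se] = segs ++ [(se.1, se.2)] from by rfl] at h; exact h)
    subst h3
    rw [show segs ++ [se] = segs ++ [(se.1, se.2)] from by rfl, chainCost_snoc]
    have hIH := ih se.1 h1
    have hstep : Fv ws ll (se.2 + 1) ≤ Fv ws ll se.1 + blk ws ll se.1 se.2 * blk ws ll se.1 se.2 := by
      rw [Fv_succ_fold ws ll se.2]
      rcases Nat.eq_or_lt_of_le h2 with heq | hlt2
      · rw [heq]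
        exact foldl_min_le_base _ _
      · have hfe : 0 ≤ blk ws ll se.1 se.2 := by
          rcases h4 with he | hge
          · omega
          · exact hge
        apply foldl_min_le_mem
        exact List.mem_filterMap.mpr ⟨se.1, List.mem_range.mpr (by omega), by rw [if_pos hfe]⟩
    omega

-- L2: Fv is attained by some chain of [0, k)
theorem Fv_attained (ws : List String) (ll : Int) :
    ∀ k, ∃ segs, SegChain ws ll 0 k segs ∧ chainCost ws ll segs = Fv ws ll k := by
  intro k
  induction k using Nat.strong_induction_on with
  | _ k ih =>
    match k with
    | 0 => exact ⟨[], rfl, by simp [chainCost, Fv, Flist]⟩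
    | k + 1 =>
      rw [Fv_succ_fold ws ll k]
      rcases foldl_min_mem_or ((List.range k).filterMap
          (fun i' => if 0 ≤ blk ws ll i' k then some (Fv ws ll i' + blk ws ll i' k * blk ws ll i' k) else none))
          (Fv ws ll k + blk ws ll k k * blk ws ll k k) with he | hm
      · obtain ⟨segs, hc, hcost⟩ := ih k (by omega)
        refine ⟨segs ++ [(k, k)], chain_snoc' ws ll segs 0 k k hc le_rfl (Or.inl rfl), ?_⟩
        rw [chainCost_snoc, he, hcost]
      · obtain ⟨i', hi', hv⟩ := List.mem_filterMap.mp hm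
        have hrange : i' < k := List.mem_range.mp hi'
        by_cases hfe : 0 ≤ blk ws ll i' k
        · rw [if_pos hfe, Option.some_inj] at hv
          obtain ⟨segs, hc, hcost⟩ := ih i' (by omega)
          refine ⟨segs ++ [(i', k)], chain_snoc' ws ll segs 0 i' k hc (by omega) (Or.inr hfe), ?_⟩
          rw [chainCost_snoc, ← hv, hcost]
        · rw [if_neg hfe] at hv
          cases hv

-- L3: Gv is a lower bound for the cost of every chain of [i, n)
theorem Gv_le_chain (ws : List String) (ll : Int) :
    ∀ segs i, SegChain ws ll i ws.length segs → Gv ws ll i ≤ chainCost ws ll segs := by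
  intro segs
  induction segs with
  | nil =>
    intro i h
    have : i = ws.length := h
    rw [Gv_stop ws ll i (by omega)]
    simp [chainCost]
  | cons se rest ih =>
    intro i h
    obtain ⟨h1, h2, h3, h4, h5⟩ := h
    subst h1
    have hin : se.1 < ws.length := by omega
    have hmem : (se.2, blk ws ll se.1 se.2) ∈ lineEnds ws ll se.1 :=
      lineEnds_complete ws ll se.1 se.2 h2 (by omega) h4
    have hle := Gv_le ws ll se.1 hin (se.2, blk ws ll se.1 se.2) hmem
    have hr := ih (se.2 + 1) h5
    simp only [chainCost, List.map_cons, List.sum_cons] at hle hr ⊢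
    omega

-- L4: Gv is attained by some chain of [i, n)
theorem Gv_attained_chain (ws : List String) (ll : Int) :
    ∀ d i, ws.length - i ≤ d → i ≤ ws.length →
      ∃ segs, SegChain ws ll i ws.length segs ∧ chainCost ws ll segs = Gv ws ll i := by
  intro d
  induction d with
  | zero =>
    intro i h1 h2
    have : i = ws.length := by omega
    subst this
    exact ⟨[], rfl, by rw [Gv_stop ws ll ws.length le_rfl]; simp [chainCost]⟩
  | succ d ih =>
    intro i h1 h2
    rcases Nat.eq_or_lt_of_le h2 with he | hlt
    · subst he
      exact ⟨[], rfl, by rw [Gv_stop ws ll ws.length le_rfl]; simp [chainCost]⟩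
    · obtain ⟨jb, hjb, hv⟩ := Gv_attained ws ll i hlt
      have hb := lineEnds_mem ws ll i jb hjb
      have hjn : jb.1 < ws.length := by omega
      obtain ⟨segs, hc, hcost⟩ := ih (jb.1 + 1) (by omega) (by omega)
      refine ⟨(i, jb.1) :: segs, ⟨rfl, hb.1, by omega, ?_, hc⟩, ?_⟩
      · rcases hb.2.2.2 with he1 | hge
        · exact Or.inl he1
        · exact Or.inr (by rw [← hb.2.2.1]; exact hge)
      · simp only [chainCost, List.map_cons, List.sum_cons]
        rw [hv, ← hb.2.2.1]
        simp only [chainCost] at hcost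
        omega

-- the two reference DPs agree on the whole list
theorem Gv_eq_Fv (ws : List String) (ll : Int) : Gv ws ll 0 = Fv ws ll ws.length := by
  apply le_antisymm
  · obtain ⟨segs, hc, hcost⟩ := Fv_attained ws ll ws.length
    calc Gv ws ll 0 ≤ chainCost ws ll segs := Gv_le_chain ws ll segs 0 hc
      _ = Fv ws ll ws.length := hcost
  · obtain ⟨segs, hc, hcost⟩ := Gv_attained_chain ws ll ws.length 0 (by omega) (by omega)
    calc Fv ws ll ws.length ≤ chainCost ws ll segs := Fv_le_chain ws ll segs ws.length hc
      _ = Gv ws ll 0 := hcost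

-- memo invariant: every stored value is the suffix optimum, and n ↦ 0 is present
def MemoInv (ws : List String) (ll : Int) (memo : PySem.Dict Nat Int) : Prop :=
  (∀ k v, memo.get? k = some v → v = Gv ws ll k) ∧ memo.get? ws.length = some 0

-- the step of bestL's fold, named for the proofs (same body as in bestL)
def bStep (ws : List String) (ll : Int) (fuel : Nat)
    (p : Option Int × PySem.Dict Nat Int) (jb : Nat × Int) : Option Int × PySem.Dict Nat Int :=
  let r := bestL ws ll fuel (jb.1 + 1) p.2
  let c := jb.2 * jb.2 + r.1
  (match p.1 with
   | none => some c
   | some a => some (min a c), r.2)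

theorem bestL_unfold_miss (ws : List String) (ll : Int) (fuel i : Nat) (memo : PySem.Dict Nat Int)
    (hg : memo.get? i = none) :
    bestL ws ll (fuel + 1) i memo
      = (((lineEnds ws ll i).foldl (bStep ws ll fuel) (none, memo)).1.getD 0,
         ((lineEnds ws ll i).foldl (bStep ws ll fuel) (none, memo)).2.insert i
           (((lineEnds ws ll i).foldl (bStep ws ll fuel) (none, memo)).1.getD 0)) := by
  simp only [bestL, hg]
  rfl

-- the fold inside bestL threads the memo and computes the running optional min of the candidates
theorem foldB_spec (ws : List String) (ll : Int) (fuel : Nat)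
    (ihfuel : ∀ i memo, MemoInv ws ll memo → i ≤ ws.length → ws.length - i ≤ fuel →
      (bestL ws ll fuel i memo).1 = Gv ws ll i ∧ MemoInv ws ll (bestL ws ll fuel i memo).2) :
    ∀ l : List (Nat × Int), (∀ jb ∈ l, jb.1 + 1 ≤ ws.length ∧ ws.length - (jb.1 + 1) ≤ fuel) →
      ∀ acc memo, MemoInv ws ll memo →
        (l.foldl (bStep ws ll fuel) (acc, memo)).1
            = (l.map (fun jb => jb.2 * jb.2 + Gv ws ll (jb.1 + 1))).foldl
                (fun o x => match o with | none => some x | some a => some (min a x)) acc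
        ∧ MemoInv ws ll ((l.foldl (bStep ws ll fuel) (acc, memo)).2) := by
  intro l
  induction l with
  | nil => intro _ acc memo hinv; exact ⟨rfl, hinv⟩
  | cons x t ih =>
    intro hmem acc memo hinv
    obtain ⟨hx1, hx2⟩ := hmem x List.mem_cons_self
    obtain ⟨hv, hinv'⟩ := ihfuel (x.1 + 1) memo hinv hx1 hx2
    have hstep : bStep ws ll fuel (acc, memo) x
        = ((match acc with
            | none => some (x.2 * x.2 + Gv ws ll (x.1 + 1))
            | some a => some (min a (x.2 * x.2 + Gv ws ll (x.1 + 1)))),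
           (bestL ws ll fuel (x.1 + 1) memo).2) := by
      simp only [bStep, hv]
    rw [List.foldl_cons, hstep, List.map_cons, List.foldl_cons]
    exact ih (fun jb hjb => hmem jb (List.mem_cons_of_mem x hjb))
      _ _ hinv'

theorem bestL_spec (ws : List String) (ll : Int) :
    ∀ fuel i memo, MemoInv ws ll memo → i ≤ ws.length → ws.length - i ≤ fuel →
      (bestL ws ll fuel i memo).1 = Gv ws ll i ∧ MemoInv ws ll (bestL ws ll fuel i memo).2 := by
  intro fuel
  induction fuel with
  | zero =>
    intro i memo hinv hi h
    have hie : i = ws.length := by omega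
    subst hie
    simp only [bestL, hinv.2]
    exact ⟨(by rw [Gv_stop ws ll ws.length le_rfl]), hinv⟩
  | succ fuel ih =>
    intro i memo hinv hi h
    rcases hg : memo.get? i with _ | v
    case some =>
      simp only [bestL, hg]
      exact ⟨hinv.1 i v hg, hinv⟩
    case none =>
      have hlt : i < ws.length := by
        rcases Nat.eq_or_lt_of_le hi with he | hlt
        · rw [he, hinv.2] at hg; cases hg
        · exact hlt
      have hprem : ∀ jb ∈ lineEnds ws ll i, jb.1 + 1 ≤ ws.length ∧ ws.length - (jb.1 + 1) ≤ fuel := by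
        intro jb hjb
        have hb := lineEnds_mem ws ll i jb hjb
        constructor <;> omega
      obtain ⟨hfold1, hfold2⟩ := foldB_spec ws ll fuel ih (lineEnds ws ll i) hprem none memo hinv
      have hval : ((lineEnds ws ll i).foldl (bStep ws ll fuel) (none, memo)).1.getD 0 = Gv ws ll i := by
        rw [hfold1, Gv_fold ws ll i hlt]
        rfl
      rw [bestL_unfold_miss ws ll fuel i memo hg]
      refine ⟨hval, ?_, ?_⟩
      · intro k v hkv
        rw [PySem.Dict.get?_insert] at hkv
        by_cases hk : k = i
        · rw [if_pos hk] at hkv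
          rw [hk, ← hval]
          exact (Option.some_inj.mp hkv).symm
        · rw [if_neg hk] at hkv
          exact hfold2.1 k v hkv
      · rw [PySem.Dict.get?_insert, if_neg (by omega)]
        exact hfold2.2

-- the warm-up loop preserves the memo invariant
theorem warmup_inv (ws : List String) (ll : Int) :
    ∀ l : List Nat, (∀ i ∈ l, i ≤ ws.length) → ∀ memo, MemoInv ws ll memo →
      MemoInv ws ll (l.foldl (fun memo i => (bestL ws ll ws.length i memo).2) memo) := by
  intro l
  induction l with
  | nil => intro _ memo hinv; exact hinv
  | cons x t ih =>
    intro hmem memo hinv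
    rw [List.foldl_cons]
    exact ih (fun i hi => hmem i (List.mem_cons_of_mem x hi)) _
      (bestL_spec ws ll ws.length x memo hinv (hmem x List.mem_cons_self) (by omega)).2

theorem B_eq_Fv (ws : List String) (ll : Int) :
    minimum_messiness_alt ws ll = Fv ws ll ws.length := by
  have hinv : MemoInv ws ll ((PySem.Dict.empty).insert ws.length 0) := by
    constructor
    · intro k v hkv
      rw [PySem.Dict.get?_insert] at hkv
      by_cases hk : k = ws.length
      · rw [if_pos hk] at hkv
        rw [hk, Gv_stop ws ll ws.length le_rfl]
        exact (Option.some_inj.mp hkv).symm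
      · rw [if_neg hk, PySem.Dict.get?_empty] at hkv
        cases hkv
    · rw [PySem.Dict.get?_insert, if_pos rfl]
  have hinv1 := warmup_inv ws ll ((List.range ws.length).reverse)
    (fun i hi => Nat.le_of_lt (List.mem_range.mp (List.mem_reverse.mp hi)))
    ((PySem.Dict.empty).insert ws.length 0) hinv
  have := (bestL_spec ws ll ws.length 0 _ hinv1 (Nat.zero_le _) (by omega)).1
  unfold minimum_messiness_alt
  rw [this, Gv_eq_Fv]

-- ===== VERDICT (by name: the statement is the Claim_ definition above) =====
-- ===== VERDICT (by name: the statement is the Claim_ definition above) =====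
theorem minimum_messiness_spec : Claim_equal_minimum_messiness := by
  intro ws ll _ hpre
  unfold Spec_minimum_messiness
  rw [A_eq_Fv ws ll hpre, B_eq_Fv]
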